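-- pv_equiv track=rewrite | github.com/daniel-zeiler/potential-happiness | TakeOne/Trees/Solutions_Two.py | validate_binary_nodes
-- ===== SOURCE A (Python) =====
-- from typing import Optional, List
--
-- def validate_binary_nodes(n: int, leftChild: List[int], rightChild: List[int]) -> bool:
--     in_degree_set = {n for n in range(n)}
--
--     for left, right in zip(leftChild, rightChild):
--         if left != -1 and left in in_degree_set:
--             in_degree_set.remove(left)
--         if right != -1 and right in in_degree_set:
--             in_degree_set.remove(right)
--
--     if not in_degree_set or len(in_degree_set) != 1:
--         return False
--
--     visited = set()
--
--     def traverse(node_id):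
--         if node_id in visited:
--             return False
--         visited.add(node_id)
--         if leftChild[node_id] != -1 and not traverse(leftChild[node_id]):
--             return False
--         if rightChild[node_id] != -1 and not traverse(rightChild[node_id]):
--             return False
--         return True
--
--     return traverse(list(in_degree_set)[0])
-- ===== SOURCE B (Python) =====
-- def validate_binary_nodes(n, leftChild, rightChild):
--     children = {c for pair in zip(leftChild, rightChild) for c in pair if c != -1}
--     roots = set(range(n)) - children
--     if len(roots) != 1:
--         return False
--     stack = [roots.pop()]
--     visited = set()
--     while stack:
--         node = stack.pop()
--         if node in visited:
--             return False
--         visited.add(node)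
--         if rightChild[node] != -1:
--             stack.append(rightChild[node])
--         if leftChild[node] != -1:
--             stack.append(leftChild[node])
--     return True
-- ===== Notes on version B (the rewrite author's own statement) =====
-- stated objective: alternative
-- what changed: Root finding becomes a one-shot set difference (range(n) minus the set of non -1 children of the zipped pairs) instead of A's pair-by-pair conditional removals, and the recursive traverse is replaced by an explicit stack-based DFS loop with the same revisit-detection.
-- outside the precondition, e.g. on validate_binary_nodes(4, [1, -1, 3, 2], [-1, -1, 9, -1]): A returns True, B returns True
import Mathlib
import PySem

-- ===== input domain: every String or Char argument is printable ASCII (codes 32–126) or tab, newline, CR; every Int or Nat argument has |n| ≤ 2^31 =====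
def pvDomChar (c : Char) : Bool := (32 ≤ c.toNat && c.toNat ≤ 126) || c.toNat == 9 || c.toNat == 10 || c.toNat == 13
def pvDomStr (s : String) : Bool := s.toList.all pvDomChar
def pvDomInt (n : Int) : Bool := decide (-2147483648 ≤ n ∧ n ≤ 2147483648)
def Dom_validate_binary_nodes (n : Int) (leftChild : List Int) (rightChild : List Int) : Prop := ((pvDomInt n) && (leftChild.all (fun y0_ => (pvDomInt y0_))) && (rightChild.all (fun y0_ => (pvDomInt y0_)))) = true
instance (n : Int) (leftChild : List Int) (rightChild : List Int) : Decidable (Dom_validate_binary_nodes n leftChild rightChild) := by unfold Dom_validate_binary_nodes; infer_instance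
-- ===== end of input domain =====

-- B replaces A's pair-by-pair in-degree removals with a one-shot set difference and A's
-- recursive traverse with an explicit stack-based DFS loop; alternative decomposition, same cost.

-- ===== PORT A =====
-- one step of A's removal loop: 'if left != -1 and left in s: s.remove(left)' for both children
def pvStepA (s : PySem.Set Int) (p : Int × Int) : PySem.Set Int :=
  let s1 := if p.1 != -1 && PySem.Set.contains s p.1 then (PySem.Set.remove? s p.1).getD s else s
  if p.2 != -1 && PySem.Set.contains s1 p.2 then (PySem.Set.remove? s1 p.2).getD s1 else s1

-- A's recursive 'traverse', fueled for totality; returns (result, visited, remaining fuel).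
-- The fuel the port passes (len+len+2) is never exhausted where the Python returns; the
-- 'min … f' clamp only makes termination structural (it collapses by pvTrA_fuel_le below).
-- A child index out of range is an IndexError in Python (excluded by Pre_); pyGet? models
-- Python's indexing (including negative wraparound), with the -1 default acting as a leaf there.
def pvTrA (L R : List Int) (fuel : Nat) (vis : PySem.Set Int) (v : Int) : Bool × PySem.Set Int × Nat :=
  match fuel with
  | 0 => (false, vis, 0)
  | f + 1 =>
    if PySem.Set.contains vis v then (false, vis, f)
    else
      let vis1 := PySem.Set.add vis v
      let l := (PySem.List.pyGet? L v).getD (-1)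
      let r := (PySem.List.pyGet? R v).getD (-1)
      if l != -1 then
        let res1 := pvTrA L R f vis1 l
        if !res1.1 then (false, res1.2.1, res1.2.2)
        else if r != -1 then pvTrA L R (min res1.2.2 f) res1.2.1 r
        else res1
      else if r != -1 then pvTrA L R f vis1 r
      else (true, vis1, f)
termination_by fuel
decreasing_by
  · exact Nat.lt_succ_self f
  · exact Nat.lt_succ_of_le (Nat.min_le_right _ _)
  · exact Nat.lt_succ_self f

def validate_binary_nodes (n : Int) (leftChild : List Int) (rightChild : List Int) : Bool :=
  -- in_degree_set = {n for n in range(n)}: range(n) has no duplicates, so this set IS the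
  -- range list (PySem.Set.ofList_eq_self_of_nodup with PySem.List.nodup_pyRange_one);
  -- then the removal loop over zip(leftChild, rightChild)
  let s := (leftChild.zip rightChild).foldl pvStepA (PySem.List.pyRange 0 n 1 : PySem.Set Int)
  -- 'if not in_degree_set or len(in_degree_set) != 1: return False'
  if decide (s = []) || s.length != 1 then false
  -- 'return traverse(list(in_degree_set)[0])' — the set is a singleton here, so the
  -- element taken is order-independent
  else (pvTrA leftChild rightChild (leftChild.length + rightChild.length + 2) PySem.Set.empty
         ((PySem.List.pyGet? s 0).getD 0)).1

-- ===== PORT B =====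
-- B's while loop over the explicit stack (head of the list = top of the stack), fueled for
-- totality; the fuel the port passes is never exhausted where the Python loop terminates.
def pvLoopB (L R : List Int) (fuel : Nat) (vis : PySem.Set Int) (stack : List Int) : Bool :=
  match fuel, stack with
  | _, [] => true
  | 0, _ :: _ => false
  | f + 1, v :: stk =>
    if PySem.Set.contains vis v then false
    else
      let vis1 := PySem.Set.add vis v
      let l := (PySem.List.pyGet? L v).getD (-1)
      let r := (PySem.List.pyGet? R v).getD (-1)
      -- python appends rightChild[node] then leftChild[node]; pop takes the last = leftChild
      pvLoopB L R f vis1 ((if l != -1 then [l] else []) ++ (if r != -1 then [r] else []) ++ stk)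

def validate_binary_nodes_alt (n : Int) (leftChild : List Int) (rightChild : List Int) : Bool :=
  -- children = {c for pair in zip(leftChild, rightChild) for c in pair if c != -1}
  let children := PySem.Set.ofList
    (((leftChild.zip rightChild).flatMap (fun p => [p.1, p.2])).filter (fun c => c != -1))
  -- roots = set(range(n)) - children; set(range(n)) is the duplicate-free range list itself
  let roots := PySem.Set.diff (PySem.List.pyRange 0 n 1 : PySem.Set Int) children
  if roots.length != 1 then false
  -- stack = [roots.pop()] — the set is a singleton here, so the element is order-independent
  else pvLoopB leftChild rightChild (leftChild.length + rightChild.length + 2) PySem.Set.empty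
         [(PySem.List.pyGet? roots 0).getD 0]

-- ===== PRECONDITION & SPEC =====
-- Pre_ excludes the inputs on which A's traversal may hit an index outside both arrays'
-- Python range and raise IndexError: it admits every input on which the number of in-degree-0
-- ids in range(n) differs from 1 (both programs answer False before any indexing happens),
-- and every input whose n and non -1 entries all fit inside both arrays' index range; a few
-- excluded inputs still return because the out-of-range entry is never reached (see the cite).
def Pre_validate_binary_nodes (n : Int) (leftChild : List Int) (rightChild : List Int) : Prop :=
  n - ((PySem.List.dedup ((leftChild.zip rightChild).flatMap (fun p => [p.1, p.2]))).filter
      (fun c => decide (0 ≤ c ∧ c < n))).length ≠ 1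
  ∨ (n ≤ (leftChild.length : Int) ∧ n ≤ (rightChild.length : Int) ∧
      ∀ x ∈ leftChild ++ rightChild, x = -1 ∨
        (-(min (leftChild.length : Int) (rightChild.length : Int)) ≤ x ∧
          x < min (leftChild.length : Int) (rightChild.length : Int)))
instance (n : Int) (leftChild : List Int) (rightChild : List Int) : Decidable (Pre_validate_binary_nodes n leftChild rightChild) := by unfold Pre_validate_binary_nodes; infer_instance

def pvWitness_validate_binary_nodes : Int × List Int × List Int := (2, [1, -1], [-1, -1])

def Spec_validate_binary_nodes (n : Int) (leftChild : List Int) (rightChild : List Int) (out : Bool) : Prop := out = validate_binary_nodes_alt n leftChild rightChild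
instance (n : Int) (leftChild : List Int) (rightChild : List Int) (out : Bool) : Decidable (Spec_validate_binary_nodes n leftChild rightChild out) := by unfold Spec_validate_binary_nodes; infer_instance

-- ===== CLAIM (what is proved, stated in full; the proofs are below) =====
def Claim_equal_validate_binary_nodes : Prop := ∀ (n : Int) (leftChild : List Int) (rightChild : List Int), Dom_validate_binary_nodes n leftChild rightChild → Pre_validate_binary_nodes n leftChild rightChild → Spec_validate_binary_nodes n leftChild rightChild (validate_binary_nodes n leftChild rightChild)

-- ===== LEMMAS AND PROOFS =====

-- the remaining fuel pvTrA returns never exceeds the fuel it got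
lemma pvTrA_fuel_le (L R : List Int) (fuel : Nat) (vis : PySem.Set Int) (v : Int) :
    (pvTrA L R fuel vis v).2.2 ≤ fuel := by
  fun_induction pvTrA L R fuel vis v <;> simp_all <;> try omega
  all_goals (rename_i ih; exact le_trans ih (Nat.le_succ _))

-- simulation: B's stack loop runs A's recursion on the top node, then continues on the rest
lemma pvSim (L R : List Int) (fuel : Nat) : ∀ (vis : PySem.Set Int) (v : Int) (stk : List Int),
    pvLoopB L R (fuel + 1) vis (v :: stk) =
      (if (pvTrA L R (fuel + 1) vis v).1 then
        pvLoopB L R (pvTrA L R (fuel + 1) vis v).2.2 (pvTrA L R (fuel + 1) vis v).2.1 stk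
      else false) := by
  induction fuel using Nat.strong_induction_on with
  | _ f ih =>
    intro vis v stk
    rw [pvLoopB, pvTrA]
    by_cases hm : v ∈ vis
    · simp [hm]
    · have hc : PySem.Set.contains vis v = false :=
        Bool.eq_false_iff.mpr (fun h => hm ((PySem.Set.contains_iff _ _).mp h))
      simp only [hc, Bool.false_eq_true, if_false]
      by_cases hle : (PySem.List.pyGet? L v).getD (-1) = -1
      · by_cases hre : (PySem.List.pyGet? R v).getD (-1) = -1
        · simp [hle, hre]
        · simp only [hle, hre, bne_self_eq_false, Bool.false_eq_true, if_false,
            List.nil_append, bne_iff_ne, ne_eq, not_false_iff, if_true, List.cons_append]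
          cases f with
          | zero => simp [pvLoopB, pvTrA]
          | succ g => exact ih g (Nat.lt_succ_self g) (vis.add v) _ stk
      · have hlb : ((PySem.List.pyGet? L v).getD (-1) != -1) = true := by simp [hle]
        simp only [hlb, if_true]
        cases f with
        | zero => simp [pvLoopB, pvTrA]
        | succ g =>
          simp only [List.cons_append, List.nil_append]
          rw [ih g (Nat.lt_succ_self g) (vis.add v) ((PySem.List.pyGet? L v).getD (-1))
              ((if (PySem.List.pyGet? R v).getD (-1) != -1 then [(PySem.List.pyGet? R v).getD (-1)] else []) ++ stk)]
          set res1 := pvTrA L R (g + 1) (vis.add v) ((PySem.List.pyGet? L v).getD (-1)) with hres1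
          by_cases hb1 : res1.1 = true
          · simp only [hb1, if_true, Bool.not_true, Bool.false_eq_true, if_false]
            by_cases hre : (PySem.List.pyGet? R v).getD (-1) = -1
            · simp [hre, hb1]
            · have hrb : ((PySem.List.pyGet? R v).getD (-1) != -1) = true := by simp [hre]
              simp only [hrb, if_true, List.cons_append, List.nil_append]
              have hfle : res1.2.2 ≤ g + 1 := by
                rw [hres1]; exact pvTrA_fuel_le L R (g + 1) _ _
              have hmin : min res1.2.2 (g + 1) = res1.2.2 := by omega
              rw [hmin]
              cases hf2 : res1.2.2 with
              | zero => simp [pvLoopB, pvTrA]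
              | succ h => exact ih h (by omega) res1.2.1 ((PySem.List.pyGet? R v).getD (-1)) stk
          · simp only [Bool.not_eq_true] at hb1
            simp [hb1]

-- one conditional removal of A's loop is a filter of the underlying list
lemma pvRemove_eq_filter (s : PySem.Set Int) (a : Int) :
    (if a != -1 && PySem.Set.contains s a then (PySem.Set.remove? s a).getD s else s)
      = s.filter (fun y => a == -1 || !(y == a)) := by
  by_cases ha : a = -1
  · simp [ha]
  · by_cases hmem : a ∈ s
    · have hct : PySem.Set.contains s a = true := (PySem.Set.contains_iff s a).mpr hmem
      have hb : (a != -1) = true := by simp [ha]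
      simp only [PySem.Set.remove?, hct, hb, Bool.and_true, if_true,
        Option.getD_some, PySem.Set.discard]
      refine List.filter_congr (fun y _ => ?_)
      have : (a == -1) = false := by simpa using ha
      simp [this]
    · have hcf : PySem.Set.contains s a = false :=
        Bool.eq_false_iff.mpr (fun h => hmem ((PySem.Set.contains_iff s a).mp h))
      simp only [hcf, Bool.and_false, Bool.false_eq_true, if_false]
      refine (List.filter_eq_self.mpr ?_).symm
      intro y hy
      have : y ≠ a := fun h => hmem (h ▸ hy)
      simp [ha, this]

-- A's whole removal loop is a filter of the starting set
lemma pvFoldA_filter : ∀ (ps : List (Int × Int)) (s : PySem.Set Int),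
    ps.foldl pvStepA s
      = s.filter (fun y => ps.all (fun p =>
          ((p.1 == -1) || !(y == p.1)) && ((p.2 == -1) || !(y == p.2)))) := by
  intro ps
  induction ps with
  | nil => intro s; simp
  | cons p ps ihp =>
    intro s
    rw [List.foldl_cons, ihp]
    show ((pvStepA s p).filter _) = _
    unfold pvStepA
    rw [pvRemove_eq_filter, pvRemove_eq_filter, List.filter_filter, List.filter_filter]
    simp only [List.all_cons]
    refine List.filter_congr (fun y _ => ?_)
    ac_rfl

-- the two root computations produce the same list (on every input: both read the zip pairs)
lemma pvRoots_eq (n : Int) (L R : List Int) :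
    (L.zip R).foldl pvStepA (PySem.List.pyRange 0 n 1 : PySem.Set Int)
      = PySem.Set.diff (PySem.List.pyRange 0 n 1 : PySem.Set Int)
          (PySem.Set.ofList
            (((L.zip R).flatMap (fun p => [p.1, p.2])).filter (fun c => c != -1))) := by
  rw [pvFoldA_filter]
  simp only [PySem.Set.diff]
  refine List.filter_congr (fun y hy => ?_)
  have hy0 : 0 ≤ y := (PySem.List.mem_pyRange_one.mp hy).1
  have hyne : y ≠ -1 := by omega
  rw [Bool.eq_iff_iff]
  constructor
  · intro h1
    rw [List.all_eq_true] at h1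
    simp only [Bool.not_eq_true', Bool.eq_false_iff, ne_eq, PySem.Set.contains_iff]
    rw [PySem.Set.mem_ofList, List.mem_filter]
    rintro ⟨hmem, _⟩
    rw [List.mem_flatMap] at hmem
    rcases hmem with ⟨p, hp, hyp⟩
    simp only [List.mem_cons, List.not_mem_nil, or_false] at hyp
    have := h1 p hp
    simp only [Bool.and_eq_true, Bool.or_eq_true, beq_iff_eq, Bool.not_eq_true',
      beq_eq_false_iff_ne, ne_eq] at this
    rcases hyp with h | h
    · rcases this.1 with h' | h' <;> simp_all
    · rcases this.2 with h' | h' <;> simp_all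
  · intro h2
    simp only [Bool.not_eq_true', Bool.eq_false_iff, ne_eq, PySem.Set.contains_iff,
      PySem.Set.mem_ofList, List.mem_filter] at h2
    rw [List.all_eq_true]
    intro p hp
    simp only [Bool.and_eq_true, Bool.or_eq_true, beq_iff_eq, Bool.not_eq_true',
      beq_eq_false_iff_ne, ne_eq]
    constructor
    · right
      intro h
      exact h2 ⟨List.mem_flatMap.mpr ⟨p, hp, by simp [h]⟩, by simpa [← h] using hyne⟩
    · right
      intro h
      exact h2 ⟨List.mem_flatMap.mpr ⟨p, hp, by simp [h]⟩, by simpa [← h] using hyne⟩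

lemma pvLoopB_nil (L R : List Int) (fuel : Nat) (vis : PySem.Set Int) :
    pvLoopB L R fuel vis [] = true := by
  cases fuel <;> rfl

-- the two ports agree on every input; Pre_ is needed only so the ports are run where the
-- Python A returns (it raises outside Pre_), not for this equality itself
lemma pvMain (n : Int) (L R : List Int) :
    validate_binary_nodes n L R = validate_binary_nodes_alt n L R := by
  simp only [validate_binary_nodes, validate_binary_nodes_alt]
  rw [pvRoots_eq n L R]
  set s := PySem.Set.diff (PySem.List.pyRange 0 n 1 : PySem.Set Int)
      (PySem.Set.ofList
        (((L.zip R).flatMap (fun p => [p.1, p.2])).filter (fun c => c != -1))) with hs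
  by_cases h1 : s.length = 1
  · have hne : s ≠ [] := by intro h; rw [h] at h1; simp at h1
    simp only [hne, h1, decide_false, bne_self_eq_false, Bool.or_self, Bool.false_eq_true,
      if_false]
    have hsim := pvSim L R (L.length + R.length + 1) PySem.Set.empty
      ((PySem.List.pyGet? s 0).getD 0) []
    have hK : L.length + R.length + 2 = (L.length + R.length + 1) + 1 := rfl
    rw [hK, hsim]
    rw [pvLoopB_nil]
    cases (pvTrA L R (L.length + R.length + 1 + 1) PySem.Set.empty
      ((PySem.List.pyGet? s 0).getD 0)).1 <;> simp
  · have : (s.length != 1) = true := by simpa using h1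
    simp [this]

-- ===== VERDICT (by name: the statement is the Claim_ definition above) =====
theorem validate_binary_nodes_spec : Claim_equal_validate_binary_nodes := by
  intro n L R _ _
  unfold Spec_validate_binary_nodes
  exact pvMain n L R
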